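-- pv_equiv track=rewrite | github.com/neveratdennys/PostgreSQLMigration | general/modify.py | checkWrap
-- ===== SOURCE A (Python) =====
-- def checkWrap(my_string):
--     count = 0
--     left = ["(", "[", "{"]
--     right = [")", "]", "}"]
--     apos = 0
--     quote = 0
--     for c in my_string:
--         # handle brackets
--         if c in left:
--             count+=1
--         elif c in right:
--             count-=1
--
--         # handle '
--         if (c == "'") and (apos == 0):
--             apos = 1
--         elif (c == "'") and (apos == 1):
--             apos = 0
--         # handle "
--         if (c == '"') and (quote == 0):
--             quote = 1
--         elif (c == '"') and (quote == 1):
--             quote = 0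
--
--     return count + apos + quote
-- ===== SOURCE B (Python) =====
-- def checkWrap(my_string):
--     balance = (my_string.count("(") + my_string.count("[") + my_string.count("{")
--                - my_string.count(")") - my_string.count("]") - my_string.count("}"))
--     return balance + my_string.count("'") % 2 + my_string.count('"') % 2
-- ===== Notes on version B (the rewrite author's own statement) =====
-- stated objective: simpler
-- what changed: Replaced the explicit character loop with a three-state machine (bracket counter plus two toggle flags) by closed-form str.count arithmetic: bracket balance as sums of counts and the quote toggles as count parity (% 2).
import Mathlib
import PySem

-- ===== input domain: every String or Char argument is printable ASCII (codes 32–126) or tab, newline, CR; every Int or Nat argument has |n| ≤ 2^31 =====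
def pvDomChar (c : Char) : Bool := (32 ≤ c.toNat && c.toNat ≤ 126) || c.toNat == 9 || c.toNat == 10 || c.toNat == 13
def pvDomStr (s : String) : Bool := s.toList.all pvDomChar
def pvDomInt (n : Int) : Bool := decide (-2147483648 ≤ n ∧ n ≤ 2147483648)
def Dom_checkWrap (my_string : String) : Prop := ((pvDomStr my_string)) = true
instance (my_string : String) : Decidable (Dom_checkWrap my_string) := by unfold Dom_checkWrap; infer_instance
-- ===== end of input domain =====

-- B replaces A's character-by-character state machine with closed-form str.count arithmetic
-- (bracket balance as sums of counts, quote toggles as count parity); objective: simpler.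

-- ===== PORT A =====
-- one loop step of A: update (count, apos, quote) at character c
def checkWrapStep (st : Int × Int × Int) (c : Char) : Int × Int × Int :=
  let left : List Char := ['(', '[', '{']
  let right : List Char := [')', ']', '}']
  let count := if left.contains c then st.1 + 1
               else if right.contains c then st.1 - 1
               else st.1
  let apos := if c = '\'' ∧ st.2.1 = 0 then 1
              else if c = '\'' ∧ st.2.1 = 1 then 0
              else st.2.1
  let quote := if c = '"' ∧ st.2.2 = 0 then 1
               else if c = '"' ∧ st.2.2 = 1 then 0
               else st.2.2
  (count, apos, quote)

def checkWrap (my_string : String) : Int :=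
  let st := my_string.toList.foldl checkWrapStep (0, 0, 0)
  st.1 + st.2.1 + st.2.2

-- ===== PORT B =====
def checkWrap_alt (my_string : String) : Int :=
  let balance : Int :=
    (PySem.Str.count my_string "(" : Int) + (PySem.Str.count my_string "[" : Int)
      + (PySem.Str.count my_string "{" : Int)
      - (PySem.Str.count my_string ")" : Int) - (PySem.Str.count my_string "]" : Int)
      - (PySem.Str.count my_string "}" : Int)
  balance + ((PySem.Str.count my_string "'" % 2 : Nat) : Int)
          + ((PySem.Str.count my_string "\"" % 2 : Nat) : Int)

-- ===== PRECONDITION & SPEC =====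
def Spec_checkWrap (my_string : String) (out : Int) : Prop := out = checkWrap_alt my_string
instance (my_string : String) (out : Int) : Decidable (Spec_checkWrap my_string out) := by unfold Spec_checkWrap; infer_instance

-- ===== CLAIM (what is proved, stated in full; the proofs are below) =====
def Claim_equal_checkWrap : Prop := ∀ (my_string : String), Dom_checkWrap my_string → Spec_checkWrap my_string (checkWrap my_string)

-- ===== LEMMAS AND PROOFS =====

-- Python str.count of a single character equals List.count
theorem chars_count_go_single (c : Char) : ∀ (l : List Char) (acc : Nat),
    PySem.Chars.count.go [c] l.length l acc = acc + l.count c := by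
  intro l
  induction l with
  | nil => intro acc; simp [PySem.Chars.count.go]
  | cons h t ih =>
      intro acc
      rw [List.length_cons, PySem.Chars.count.go]
      by_cases hc : c = h
      · subst hc
        simp [List.isPrefixOf, ih, List.count_cons]
        omega
      · simp [List.isPrefixOf, hc, ih, List.count_cons, Ne.symm hc]

theorem chars_count_single (c : Char) (l : List Char) :
    PySem.Chars.count l [c] = l.count c := by
  simp [PySem.Chars.count, chars_count_go_single]

-- bracket weight of one character
def pvW (c : Char) : Int :=
  if c = '(' ∨ c = '[' ∨ c = '{' then 1
  else if c = ')' ∨ c = ']' ∨ c = '}' then -1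
  else 0

-- bracket balance of a char list
def pvBal (l : List Char) : Int :=
  (l.count '(' : Int) + (l.count '[' : Int) + (l.count '{' : Int)
    - (l.count ')' : Int) - (l.count ']' : Int) - (l.count '}' : Int)

theorem pvBal_cons (c : Char) (t : List Char) : pvBal (c :: t) = pvW c + pvBal t := by
  by_cases h1 : c = '('
  · subst h1; simp [pvBal, pvW, List.count_cons]; ring
  by_cases h2 : c = '['
  · subst h2; simp [pvBal, pvW, List.count_cons]; ring
  by_cases h3 : c = '{'
  · subst h3; simp [pvBal, pvW, List.count_cons]; ring
  by_cases h4 : c = ')'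
  · subst h4; simp [pvBal, pvW, List.count_cons]; ring
  by_cases h5 : c = ']'
  · subst h5; simp [pvBal, pvW, List.count_cons]; ring
  by_cases h6 : c = '}'
  · subst h6; simp [pvBal, pvW, List.count_cons]; ring
  · simp [pvBal, pvW, List.count_cons, h1, h2, h3, h4, h5, h6,
      Ne.symm h1, Ne.symm h2, Ne.symm h3, Ne.symm h4, Ne.symm h5, Ne.symm h6]

theorem checkWrapStep_eq (cnt a q : Int) (c : Char)
    (ha : a = 0 ∨ a = 1) (hq : q = 0 ∨ q = 1) :
    checkWrapStep (cnt, a, q) c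
      = (cnt + pvW c, if c = '\'' then 1 - a else a, if c = '"' then 1 - q else q) := by
  simp only [checkWrapStep, pvW, List.contains_eq_mem, List.mem_cons, List.not_mem_nil,
    or_false, decide_eq_true_eq, Prod.mk.injEq]
  refine ⟨?_, ?_, ?_⟩ <;> split_ifs <;> first | omega | simp_all

-- loop invariant: A's fold computes the balance plus the two parities
theorem checkWrap_fold (l : List Char) : ∀ (cnt a q : Int),
    a = 0 ∨ a = 1 → q = 0 ∨ q = 1 →
    l.foldl checkWrapStep (cnt, a, q)
      = (cnt + pvBal l, (a + (l.count '\'' : Int)) % 2, (q + (l.count '"' : Int)) % 2) := by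
  induction l with
  | nil =>
      intro cnt a q ha hq
      simp [pvBal]
      constructor <;> omega
  | cons c t ih =>
      intro cnt a q ha hq
      rw [List.foldl_cons, checkWrapStep_eq cnt a q c ha hq,
        ih _ _ _ (by split_ifs <;> omega) (by split_ifs <;> omega),
        pvBal_cons]
      refine Prod.ext (by ring_nf) (Prod.ext ?_ ?_)
      · by_cases h : c = '\''
        · subst h; simp [List.count_cons, beq_iff_eq]; try omega
        · simp [List.count_cons, beq_iff_eq, h, Ne.symm h]; try omega
      · by_cases h : c = '"'
        · subst h; simp [List.count_cons, beq_iff_eq]; try omega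
        · simp [List.count_cons, beq_iff_eq, h, Ne.symm h]; try omega

-- ===== VERDICT (by name: the statement is the Claim_ definition above) =====
theorem checkWrap_spec : Claim_equal_checkWrap := by
  intro s _
  unfold Spec_checkWrap checkWrap checkWrap_alt
  rw [checkWrap_fold s.toList 0 0 0 (Or.inl rfl) (Or.inl rfl)]
  simp only [PySem.Str.count_eq]
  have h1 : ("(" : String).toList = ['('] := rfl
  have h2 : ("[" : String).toList = ['['] := rfl
  have h3 : ("{" : String).toList = ['{'] := rfl
  have h4 : (")" : String).toList = [')'] := rfl
  have h5 : ("]" : String).toList = [']'] := rfl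
  have h6 : ("}" : String).toList = ['}'] := rfl
  have h7 : ("'" : String).toList = ['\''] := rfl
  have h8 : ("\"" : String).toList = ['"'] := rfl
  rw [h1, h2, h3, h4, h5, h6, h7, h8]
  simp only [chars_count_single, pvBal]
  push_cast
  omega
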